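-- pv_equiv track=rewrite | github.com/colinjansen/advent_of_code | 2025/day2.py | find_invalid_ids_part_2
-- ===== SOURCE A (Python) =====
-- def divisors(n):
--     return [1] + [i for i in range(2, n) if n % i == 0]
--
-- def find_invalid_ids_part_2(start, end):
--     invalid_ids = set()
--     for id in range(start, end + 1):
--         sid = str(id)
--         for div in divisors(len(sid)):
--             chunks = [sid[i:i+div] for i in range(0, len(sid), div)]
--             if len(chunks) > 1 and all(chunk == chunks[0] for chunk in chunks):
--                 invalid_ids.add(id)
--     return invalid_ids
-- ===== SOURCE B (Python) =====
-- def find_invalid_ids_part_2(start, end):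
--     # an id is "invalid" iff its decimal string is a repetition of a shorter block,
--     # which holds iff the string occurs inside its own doubling with both ends chopped
--     return {i for i in range(start, end + 1) if str(i) in (str(i) + str(i))[1:-1]}
-- ===== Notes on version B (the rewrite author's own statement) =====
-- stated objective: simpler
-- what changed: Replaces the per-id loop over every proper divisor of len(str(id)), each building and comparing a list of chunks, by the classic doubling trick: id is invalid iff str(id) occurs in (str(id)+str(id))[1:-1], one substring test per id.
import Mathlib
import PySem

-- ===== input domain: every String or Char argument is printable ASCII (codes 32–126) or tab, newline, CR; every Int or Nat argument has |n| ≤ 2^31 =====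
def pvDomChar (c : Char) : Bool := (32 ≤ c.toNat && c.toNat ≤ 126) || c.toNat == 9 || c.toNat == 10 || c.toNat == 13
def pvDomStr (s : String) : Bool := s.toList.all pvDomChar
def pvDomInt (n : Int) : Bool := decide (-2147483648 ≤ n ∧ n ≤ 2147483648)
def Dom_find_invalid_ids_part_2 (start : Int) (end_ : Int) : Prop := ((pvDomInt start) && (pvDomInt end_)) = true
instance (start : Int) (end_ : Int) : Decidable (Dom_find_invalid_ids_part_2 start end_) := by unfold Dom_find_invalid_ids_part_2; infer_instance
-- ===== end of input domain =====

-- B replaces A's per-id chunk test over every proper divisor of the length by the single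
-- doubling-trick substring test "str(id) in (str(id)+str(id))[1:-1]" (objective: simpler;
-- same range scan, so no speed claim).

-- ===== PORT A =====
def divisors (n : Int) : List Int :=
  [1] ++ (PySem.List.pyRange 2 n 1).filter (fun i => PySem.Int.mod n i == 0)

def find_invalid_ids_part_2 (start : Int) (end_ : Int) : List Int :=
  (PySem.List.pyRange start (end_ + 1) 1).foldl (fun acc id =>
    let sid := PySem.Int.toChars id
    (divisors (sid.length : Int)).foldl (fun acc div =>
      let chunks := (PySem.List.pyRange 0 (sid.length : Int) div).map
        (fun i => PySem.List.slice sid (some i) (some (i + div)))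
      if chunks.length > 1 && chunks.all (fun c => c == PySem.List.pyGetD chunks 0 [])
      then PySem.Set.add acc id else acc) acc) []

-- ===== PORT B =====
def find_invalid_ids_part_2_alt (start : Int) (end_ : Int) : List Int :=
  PySem.Set.ofList ((PySem.List.pyRange start (end_ + 1) 1).filter (fun i =>
    let s := PySem.Int.toChars i
    PySem.Chars.isIn s (PySem.List.slice (s ++ s) (some 1) (some (-1)))))

-- ===== PRECONDITION & SPEC =====
def Spec_find_invalid_ids_part_2 (start : Int) (end_ : Int) (out : List Int) : Prop := out = find_invalid_ids_part_2_alt start end_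
instance (start : Int) (end_ : Int) (out : List Int) : Decidable (Spec_find_invalid_ids_part_2 start end_ out) := by unfold Spec_find_invalid_ids_part_2; infer_instance

-- ===== CLAIM (what is proved, stated in full; the proofs are below) =====
def Claim_equal_find_invalid_ids_part_2 : Prop := ∀ (start : Int) (end_ : Int), Dom_find_invalid_ids_part_2 start end_ → Spec_find_invalid_ids_part_2 start end_ (find_invalid_ids_part_2 start end_)

-- ===== LEMMAS AND PROOFS =====

def pvRep (k : Nat) (b : List Char) : List Char := List.flatten (List.replicate k b)
lemma pvRep_succ (k : Nat) (b : List Char) : pvRep (k + 1) b = b ++ pvRep k b := by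
  simp [pvRep, List.replicate_succ]
lemma pvRep_succ' (k : Nat) (b : List Char) : pvRep (k + 1) b = pvRep k b ++ b := by
  simp [pvRep, List.replicate_succ']

lemma pvCommute_pow (m : Nat) : ∀ (t b : List Char), t.length ≤ m → 0 < b.length →
    b ++ t = t ++ b → b.length ∣ t.length → t = pvRep (t.length / b.length) b := by
  induction m with
  | zero =>
    intro t b hm _ _ _
    have ht : t = [] := List.eq_nil_of_length_eq_zero (by omega)
    subst ht; simp [pvRep]
  | succ m ih =>
    intro t b hm hb hcomm hdvd
    by_cases ht : t = []
    · subst ht; simp [pvRep]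
    · have htpos : 0 < t.length := List.length_pos_of_ne_nil ht
      have hgle : b.length ≤ t.length := Nat.le_of_dvd htpos hdvd
      -- first block of t is b
      have htake : t.take b.length = b := by
        have h1 : (b ++ t).take b.length = b := List.take_left
        have h2 : (t ++ b).take b.length = t.take b.length := by
          rw [List.take_append]
          simp [Nat.sub_eq_zero_of_le hgle]
        rw [hcomm] at h1; rw [h2] at h1; exact h1
      set t' := t.drop b.length with ht'
      have hsplit : t = b ++ t' := by
        conv_lhs => rw [← List.take_append_drop b.length t]
        rw [htake]
      have hcomm' : b ++ t' = t' ++ b := by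
        have : b ++ (b ++ t') = (b ++ t') ++ b := by rw [← hsplit, hcomm, hsplit]
        rw [List.append_assoc] at this
        exact List.append_cancel_left this
      have hlen' : t'.length = t.length - b.length := by simp [ht']
      have hdvd' : b.length ∣ t'.length := by
        rw [hlen']; exact Nat.dvd_sub hdvd dvd_rfl
      have hrec := ih t' b (by omega) hb hcomm' hdvd'
      have harith : t.length / b.length = t'.length / b.length + 1 := by
        rw [hlen', Nat.div_eq_sub_div hb hgle]
      rw [harith, pvRep_succ, ← hrec, ← hsplit]

lemma pvPeriod_pow (cs : List Char) (g : Nat) (hg : 0 < g) (hle : g ≤ cs.length)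
    (hdvd : g ∣ cs.length) (hrot : cs.rotate g = cs) :
    cs = pvRep (cs.length / g) (cs.take g) := by
  set b := cs.take g with hb
  set t := cs.drop g with ht
  have hbl : b.length = g := by simp [hb, Nat.min_eq_left hle]
  have hsplit : cs = b ++ t := (List.take_append_drop g cs).symm
  have hcomm : b ++ t = t ++ b := by
    have h1 : cs.rotate g = t ++ b := List.rotate_eq_drop_append_take hle
    rw [hrot] at h1
    rw [← h1, hsplit]
  have htl : t.length = cs.length - g := by simp [ht]
  have hdvd' : b.length ∣ t.length := by rw [hbl, htl]; exact Nat.dvd_sub hdvd dvd_rfl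
  have hrec := pvCommute_pow t.length t b le_rfl (by omega) hcomm hdvd'
  have harith : cs.length / g = t.length / g + 1 := by
    rw [htl, Nat.div_eq_sub_div hg hle]
  rw [harith, pvRep_succ, hsplit]
  rw [hbl] at hrec
  rw [← hrec]

lemma pvBezout (j n : Nat) (hn : 0 < n) : ∃ m : Nat, (m * j) % n = Nat.gcd j n % n := by
  have hbez := Nat.gcd_eq_gcd_ab j n
  set A := Nat.gcdA j n
  set B := Nat.gcdB j n
  have hnpos : (0 : Int) < (n : Int) := by exact_mod_cast hn
  refine ⟨(A % (n : Int)).toNat, ?_⟩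
  have hmn : ((A % (n : Int)).toNat : Int) = A % (n : Int) :=
    Int.toNat_of_nonneg (Int.emod_nonneg A (by omega))
  have key : (((A % (n : Int)).toNat * j : Nat) : Int) % (n : Int)
      = ((Nat.gcd j n : Nat) : Int) % (n : Int) := by
    push_cast
    rw [hmn]
    calc (A % (n:Int)) * (j:Int) % (n:Int)
        = (A * (j:Int)) % (n:Int) := by
          rw [Int.mul_emod, Int.emod_emod_of_dvd _ dvd_rfl, ← Int.mul_emod]
      _ = ((Nat.gcd j n : Int) - (n:Int) * B) % (n:Int) := by
          congr 1; rw [hbez]; ring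
      _ = (Nat.gcd j n : Int) % (n:Int) := by
          rw [Int.sub_mul_emod_self_left]
  exact_mod_cast key

lemma pvRot_mul (cs : List Char) (j : Nat) (hrot : cs.rotate j = cs) (m : Nat) :
    cs.rotate (m * j) = cs := by
  induction m with
  | zero => simp
  | succ m ih => calc cs.rotate ((m + 1) * j) = (cs.rotate (m * j)).rotate j := by
                        rw [List.rotate_rotate]; ring_nf
                 _ = cs := by rw [ih, hrot]

lemma pvRot_to_pow (cs : List Char) (j : Nat) (hj0 : 0 < j) (hjn : j < cs.length)
    (hrot : cs.rotate j = cs) :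
    ∃ d, 0 < d ∧ d < cs.length ∧ d ∣ cs.length ∧ cs = pvRep (cs.length / d) (cs.take d) := by
  set n := cs.length with hn
  have hnpos : 0 < n := by omega
  set g := Nat.gcd j n with hg
  have hg0 : 0 < g := Nat.gcd_pos_of_pos_left n hj0
  have hgj : g ≤ j := Nat.le_of_dvd hj0 (Nat.gcd_dvd_left j n)
  have hgn : g ∣ n := Nat.gcd_dvd_right j n
  obtain ⟨m, hm⟩ := pvBezout j n hnpos
  have hrotg : cs.rotate g = cs := by
    have h1 : cs.rotate (g % n) = cs.rotate ((m * j) % n) := by rw [hm]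
    have h2 : cs.rotate ((m * j) % n) = cs.rotate (m * j) := List.rotate_mod cs (m * j)
    have h3 : g % n = g := Nat.mod_eq_of_lt (by omega)
    rw [h3] at h1
    rw [h1, h2, pvRot_mul cs j hrot m]
  exact ⟨g, hg0, by omega, hgn, pvPeriod_pow cs g hg0 (by omega) hgn hrotg⟩

lemma pvPow_to_rot (cs : List Char) (d : Nat) (hd0 : 0 < d) (hdn : d < cs.length)
    (_hdvd : d ∣ cs.length) (h : cs = pvRep (cs.length / d) (cs.take d)) :
    cs.rotate d = cs := by
  set b := cs.take d with hb
  have hbl : b.length = d := by simp [hb, Nat.min_eq_left (le_of_lt hdn)]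
  set k := cs.length / d with hk
  have hk1 : 1 ≤ k := Nat.le_div_iff_mul_le hd0 |>.mpr (by omega)
  obtain ⟨k', hk'⟩ : ∃ k', k = k' + 1 := ⟨k - 1, by omega⟩
  have hsp : cs = b ++ pvRep k' b := by rw [h, hk', pvRep_succ]
  have hdrop : cs.drop d = pvRep k' b := by
    conv_lhs => rw [hsp]
    rw [← hbl, List.drop_left]
  rw [List.rotate_eq_drop_append_take (le_of_lt hdn), hdrop, ← hb, ← pvRep_succ', ← hk', ← h]

lemma pvCore_iff (cs : List Char) :
    (∃ d, 0 < d ∧ d < cs.length ∧ d ∣ cs.length ∧ cs = pvRep (cs.length / d) (cs.take d)) ↔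
    (∃ j, 0 < j ∧ j < cs.length ∧ cs.rotate j = cs) := by
  constructor
  · rintro ⟨d, hd0, hdn, hdvd, h⟩
    exact ⟨d, hd0, hdn, pvPow_to_rot cs d hd0 hdn hdvd h⟩
  · rintro ⟨j, hj0, hjn, hrot⟩
    exact pvRot_to_pow cs j hj0 hjn hrot

lemma pvRot_double (cs : List Char) (i : Nat) (hi : i ≤ cs.length) :
    ((cs ++ cs).drop i).take cs.length = cs.rotate i := by
  rw [List.drop_append_of_le_length hi, List.take_append]
  have h1 : (cs.drop i).take cs.length = cs.drop i :=
    List.take_of_length_le (by simp)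
  have h2 : cs.length - (cs.drop i).length = i := by simp; omega
  rw [h1, h2, List.rotate_eq_drop_append_take hi]

lemma pvSliceDouble (cs : List Char) (hne : cs ≠ []) :
    PySem.List.slice (cs ++ cs) (some 1) (some (-1))
      = ((cs ++ cs).drop 1).take (2 * cs.length - 2) := by
  have hn : 0 < cs.length := List.length_pos_of_ne_nil hne
  simp [PySem.List.slice, PySem.List.clampIdx]
  rw [if_neg (by omega), Nat.min_eq_left (by omega)]
  rw [List.drop_one]
  congr 1
  omega

lemma pvB_iff (cs : List Char) (hne : cs ≠ []) :
    (PySem.Chars.isIn cs (PySem.List.slice (cs ++ cs) (some 1) (some (-1))) = true) ↔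
    ∃ j, 0 < j ∧ j < cs.length ∧ cs.rotate j = cs := by
  have hn : 0 < cs.length := List.length_pos_of_ne_nil hne
  set n := cs.length with hnn
  rw [pvSliceDouble cs hne, ← PySem.Chars.exists_prefix_drop_iff_isIn]
  have hdropu : ∀ j : Nat, (((cs ++ cs).drop 1).take (2 * n - 2)).drop j
      = ((cs ++ cs).drop (1 + j)).take (2 * n - 2 - j) := by
    intro j
    rw [List.drop_take, List.drop_drop]
  constructor
  · rintro ⟨j, hpre⟩
    rw [hdropu j, List.prefix_take_iff] at hpre
    obtain ⟨hpre, hlen⟩ := hpre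
    have hj : 1 + j < n ∧ 2 ≤ n := by omega
    refine ⟨1 + j, by omega, hj.1, ?_⟩
    rw [List.prefix_iff_eq_take] at hpre
    rw [← hnn] at hpre
    rw [pvRot_double cs (1 + j) (by omega)] at hpre
    exact hpre.symm
  · rintro ⟨i, hi0, hin, hrot⟩
    refine ⟨i - 1, ?_⟩
    rw [hdropu (i - 1), List.prefix_take_iff]
    have h1i : 1 + (i - 1) = i := by omega
    rw [h1i]
    refine ⟨?_, by omega⟩
    rw [List.prefix_iff_eq_take, ← hnn, pvRot_double cs i (by omega), hrot]
def pvChunks (cs : List Char) (div : Int) : List (List Char) :=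
  (PySem.List.pyRange 0 (cs.length : Int) div).map
    (fun i => PySem.List.slice cs (some i) (some (i + div)))

def pvCond (cs : List Char) (div : Int) : Bool :=
  (pvChunks cs div).length > 1 &&
    (pvChunks cs div).all (fun c => c == PySem.List.pyGetD (pvChunks cs div) 0 [])

lemma pvDrop_rep (b : List Char) (k j : Nat) (hj : j ≤ k) :
    (pvRep k b).drop (j * b.length) = pvRep (k - j) b := by
  induction j with
  | zero => simp
  | succ j ih =>
    have hk : j < k := by omega
    have h1 : (pvRep k b).drop ((j + 1) * b.length)
        = ((pvRep k b).drop (j * b.length)).drop b.length := by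
      rw [List.drop_drop]; congr 1; ring
    rw [h1, ih (by omega)]
    obtain ⟨m, hm⟩ : ∃ m, k - j = m + 1 := ⟨k - j - 1, by omega⟩
    rw [hm, pvRep_succ, List.drop_left]
    congr 1
    omega

lemma pvE1 (d : Nat) (_hd : 0 < d) : ∀ (k : Nat) (cs : List Char), cs.length = k * d →
    (∀ j, j < k → (cs.drop (j * d)).take d = cs.take d) → cs = pvRep k (cs.take d) := by
  intro k
  induction k with
  | zero =>
    intro cs hlen _
    have : cs = [] := List.eq_nil_of_length_eq_zero (by omega)
    simp [this, pvRep]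
  | succ k ih =>
    intro cs hlen hall
    by_cases hk : k = 0
    · subst hk
      have h1 : cs.take d = cs := List.take_of_length_le (by omega)
      rw [pvRep_succ]
      simp [pvRep, h1]
    · have hdn : d ≤ cs.length := by
        rw [hlen]; calc d = 1 * d := (one_mul d).symm
                       _ ≤ (k+1) * d := by exact Nat.mul_le_mul_right d (by omega)
      set cs' := cs.drop d with hcs'
      have hlen' : cs'.length = k * d := by simp [hcs', hlen]; ring_nf; omega
      have htk1 : cs'.take d = cs.take d := by
        have := hall 1 (by omega)
        simpa [hcs'] using this
      have hall' : ∀ j, j < k → (cs'.drop (j * d)).take d = cs'.take d := by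
        intro j hj
        rw [htk1]
        have h2 : cs'.drop (j * d) = cs.drop ((j + 1) * d) := by
          rw [hcs', List.drop_drop]; congr 1; ring
        rw [h2]
        exact hall (j + 1) (by omega)
      have hrec := ih cs' hlen' hall'
      rw [pvRep_succ, ← htk1, ← hrec, htk1, hcs']
      exact (List.take_append_drop d cs).symm

lemma pvE_iff (cs : List Char) (d : Nat) (hd : 0 < d) (hdvd : d ∣ cs.length) :
    cs = pvRep (cs.length / d) (cs.take d) ↔
    ∀ j, j < cs.length / d → (cs.drop (j * d)).take d = cs.take d := by
  constructor
  · intro h j hj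
    have hn0 : 0 < cs.length := by
      rcases Nat.eq_zero_or_pos cs.length with h0 | h0
    -- if the length were 0 the chunk count would be 0
      · rw [h0, Nat.zero_div] at hj; omega
      · exact h0
    have hdn : d ≤ cs.length := Nat.le_of_dvd hn0 hdvd
    have hbl : (cs.take d).length = d := by rw [List.length_take]; exact Nat.min_eq_left hdn
    have h1 : cs.drop (j * d) = pvRep (cs.length / d - j) (cs.take d) := by
      conv_lhs => rw [h]
      rw [show j * d = j * (cs.take d).length by rw [hbl]]
      exact pvDrop_rep (cs.take d) (cs.length / d) j (by omega)
    rw [h1]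
    obtain ⟨m, hm⟩ : ∃ m, cs.length / d - j = m + 1 := ⟨cs.length / d - j - 1, by omega⟩
    rw [hm, pvRep_succ]
    exact List.take_left' hbl
  · intro hall
    have hlen : cs.length = (cs.length / d) * d := (Nat.div_mul_cancel hdvd).symm
    exact pvE1 d hd (cs.length / d) cs hlen hall

lemma pvCount_dvd (n d : Nat) (hd : 0 < d) (hdvd : d ∣ n) : (n + d - 1) / d = n / d := by
  obtain ⟨q, hq⟩ := hdvd
  subst hq
  have h1 : d * q + d - 1 = (d - 1) + d * q := by omega
  rw [h1, Nat.add_mul_div_left _ _ hd, Nat.div_eq_of_lt (by omega), Nat.mul_div_cancel_left _ hd]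
  omega

lemma pvChunks_eq (cs : List Char) (d : Nat) (hd : 0 < d) :
    pvChunks cs (d : Int) = (List.range ((cs.length + d - 1) / d)).map
      (fun j => (cs.drop (j * d)).take d) := by
  set n := cs.length with hn
  unfold pvChunks
  rw [PySem.List.pyRange_of_pos 0 (n : Int) (by exact_mod_cast hd)]
  by_cases hn0 : n = 0
  · rw [if_neg (by simp [hn0]), show (n + d - 1) / d = 0 by rw [Nat.div_eq_of_lt (by omega)]]
    simp
  · rw [if_pos (by exact_mod_cast Nat.pos_of_ne_zero hn0)]
    have hcount : ((n : Int) - 0 + (d : Int) - 1) / (d : Int) = (((n + d - 1) / d : Nat) : Int) := by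
      have h1 : (n : Int) - 0 + (d : Int) - 1 = ((n + d - 1 : Nat) : Int) := by omega
      rw [h1, Int.natCast_div]
    rw [hcount, Int.toNat_natCast, List.map_map]
    apply List.map_congr_left
    intro k _
    show PySem.List.slice cs (some (0 + (d:Int) * (k:Int))) (some (0 + (d:Int) * (k:Int) + (d:Int))) = _
    have h2 : 0 + (d:Int) * (k:Int) = ((k * d : Nat) : Int) := by push_cast; ring
    rw [h2]
    exact PySem.List.slice_natCast_add cs (k * d) d

lemma pvCond_iff (cs : List Char) (d : Nat) (hd : 0 < d) (hdvd : d ∣ cs.length) :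
    pvCond cs (d : Int) = true ↔
    (1 < cs.length / d ∧ cs = pvRep (cs.length / d) (cs.take d)) := by
  unfold pvCond
  rw [pvChunks_eq cs d hd, pvCount_dvd cs.length d hd hdvd]
  rw [Bool.and_eq_true, decide_eq_true_iff, List.length_map, List.length_range]
  constructor
  · rintro ⟨hK, hall⟩
    have hdn : d ≤ cs.length := by
      by_contra hlt
      rw [Nat.not_le] at hlt
      rw [Nat.div_eq_of_lt hlt] at hK
      omega
    refine ⟨hK, (pvE_iff cs d hd hdvd).mpr ?_⟩
    intro j hj
    rw [List.all_eq_true] at hall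
    have := hall _ (List.mem_map_of_mem (List.mem_range.mpr hj))
    rw [beq_iff_eq] at this
    rw [this]
    rw [PySem.List.pyGetD_ofNat', List.getD_eq_getElem _ _ (by simp; omega)]
    simp
  · rintro ⟨hK, hrep⟩
    have hdn : d ≤ cs.length := by
      by_contra hlt
      rw [Nat.not_le] at hlt
      rw [Nat.div_eq_of_lt hlt] at hK
      omega
    refine ⟨hK, ?_⟩
    rw [List.all_eq_true]
    intro c hc
    rw [List.mem_map] at hc
    obtain ⟨j, hj, rfl⟩ := hc
    rw [List.mem_range] at hj
    rw [beq_iff_eq]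
    rw [PySem.List.pyGetD_ofNat', List.getD_eq_getElem _ _ (by simp; omega)]
    simp only [List.getElem_map, List.getElem_range]
    rw [(pvE_iff cs d hd hdvd).mp hrep j hj]
    simp

lemma pvPredA_iff (cs : List Char) :
    ((divisors (cs.length : Int)).any (fun div => pvCond cs div) = true) ↔
    ∃ d : Nat, 0 < d ∧ d < cs.length ∧ d ∣ cs.length ∧ cs = pvRep (cs.length / d) (cs.take d) := by
  unfold divisors
  rw [List.any_eq_true]
  constructor
  · rintro ⟨i, hi, hcond⟩
    rcases List.mem_append.mp hi with h1 | h2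
    · have hi1 : i = 1 := by simpa using h1
      subst hi1
      have := (pvCond_iff cs 1 (by omega) (one_dvd _)).mp (by exact_mod_cast hcond)
      exact ⟨1, by omega, by omega, one_dvd _, by simpa using this.2⟩
    · rw [List.mem_filter, PySem.List.mem_pyRange_one] at h2
      obtain ⟨⟨h2a, h2b⟩, h2c⟩ := h2
      have hdvdI : i ∣ (cs.length : Int) := by
        rw [beq_iff_eq] at h2c
        exact (PySem.Int.mod_eq_zero_iff_dvd _ _).mp h2c
      set d := i.toNat with hdni
      have hid : (d : Int) = i := Int.toNat_of_nonneg (by omega)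
      have hdvd : d ∣ cs.length := by
        rw [← Int.natCast_dvd_natCast, hid]
        exact hdvdI
      have hdlt : d < cs.length := by omega
      have := (pvCond_iff cs d (by omega) hdvd).mp (by rw [hid]; exact hcond)
      exact ⟨d, by omega, hdlt, hdvd, this.2⟩
  · rintro ⟨d, hd0, hdn, hdvd, hrep⟩
    have hK : 1 < cs.length / d := by
      rcases Nat.lt_or_ge (cs.length / d) 2 with h | h
      · exfalso
        have h1 : cs.length = cs.length / d * d := (Nat.div_mul_cancel hdvd).symm
        interval_cases h2 : cs.length / d <;> omega
      · omega
    by_cases hd1 : d = 1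
    · subst hd1
      refine ⟨1, List.mem_append_left _ (by simp), ?_⟩
      have : ((1 : Nat) : Int) = (1 : Int) := by norm_num
      rw [← this]
      exact (pvCond_iff cs 1 (by omega) hdvd).mpr ⟨hK, hrep⟩
    · refine ⟨(d : Int), List.mem_append_right _ ?_, ?_⟩
      · rw [List.mem_filter, PySem.List.mem_pyRange_one]
        refine ⟨⟨by exact_mod_cast (by omega : 2 ≤ d), by exact_mod_cast hdn⟩, ?_⟩
        rw [beq_iff_eq, PySem.Int.mod_eq_zero_iff_dvd]
        exact_mod_cast hdvd
      · exact (pvCond_iff cs d (by omega) hdvd).mpr ⟨hK, hrep⟩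

lemma pvToChars_ne_nil (i : Int) : PySem.Int.toChars i ≠ [] := by
  unfold PySem.Int.toChars
  split
  · simp
  · exact List.ne_nil_of_length_pos Nat.length_toDigits_pos

def pvPredB (i : Int) : Bool :=
  PySem.Chars.isIn (PySem.Int.toChars i)
    (PySem.List.slice (PySem.Int.toChars i ++ PySem.Int.toChars i) (some 1) (some (-1)))

lemma pvFoldl_if_add (P : Int → Bool) (x : Int) :
    ∀ (l : List Int) (acc : List Int),
    l.foldl (fun a d => if P d then PySem.Set.add a x else a) acc
      = if l.any P then PySem.Set.add acc x else acc := by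
  intro l
  induction l with
  | nil => intro acc; simp
  | cons d l ih =>
    intro acc
    rw [List.foldl_cons, List.any_cons]
    by_cases hP : P d
    · rw [if_pos hP, ih, hP]
      simp
    · rw [if_neg hP, ih]
      simp [hP]

lemma pvFilter_foldl (p : Int → Bool) :
    ∀ (l acc : List Int),
    (l.filter p).foldl PySem.Set.add acc
      = l.foldl (fun a x => if p x then PySem.Set.add a x else a) acc := by
  intro l
  induction l with
  | nil => intro acc; simp
  | cons x l ih =>
    intro acc
    by_cases hp : p x
    · rw [List.filter_cons_of_pos hp, List.foldl_cons, List.foldl_cons, if_pos hp, ih]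
    · rw [List.filter_cons_of_neg hp, List.foldl_cons, if_neg hp, ih]

lemma pvPred_eq (id : Int) :
    ((divisors ((PySem.Int.toChars id).length : Int)).any
      (fun div => pvCond (PySem.Int.toChars id) div)) = pvPredB id := by
  set cs := PySem.Int.toChars id with hcs
  rw [Bool.eq_iff_iff, pvPredA_iff, pvCore_iff]
  rw [pvPredB, ← hcs]
  exact (pvB_iff cs (hcs ▸ pvToChars_ne_nil id)).symm

lemma pvMain (start end_ : Int) :
    find_invalid_ids_part_2 start end_ = find_invalid_ids_part_2_alt start end_ := by
  unfold find_invalid_ids_part_2 find_invalid_ids_part_2_alt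
  rw [PySem.Set.ofList_eq_foldl, pvFilter_foldl]
  have hf : (fun (acc : List Int) (id : Int) =>
      let sid := PySem.Int.toChars id
      (divisors (sid.length : Int)).foldl (fun acc div =>
        let chunks := (PySem.List.pyRange 0 (sid.length : Int) div).map
          (fun i => PySem.List.slice sid (some i) (some (i + div)))
        if chunks.length > 1 && chunks.all (fun c => c == PySem.List.pyGetD chunks 0 [])
        then PySem.Set.add acc id else acc) acc)
      = (fun (acc : List Int) (id : Int) =>
        if pvPredB id then PySem.Set.add acc id else acc) := by
    funext acc id
    show (divisors ((PySem.Int.toChars id).length : Int)).foldl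
      (fun a div => if pvCond (PySem.Int.toChars id) div then PySem.Set.add a id else a) acc = _
    rw [pvFoldl_if_add, pvPred_eq]
  rw [hf]
  have hg : (fun (a : List Int) (i : Int) =>
      if (let s := PySem.Int.toChars i;
          PySem.Chars.isIn s (PySem.List.slice (s ++ s) (some 1) (some (-1)))) then PySem.Set.add a i else a)
      = (fun (a : List Int) (i : Int) => if pvPredB i then PySem.Set.add a i else a) := by
    funext a i
    rfl
  rw [hg]

-- ===== VERDICT (by name: the statement is the Claim_ definition above) =====
theorem find_invalid_ids_part_2_spec : Claim_equal_find_invalid_ids_part_2 := by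
  intro start end_ _
  exact pvMain start end_
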